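-- pv_equiv track=rewrite | github.com/tombfarias/bufferbloatTCP | mininet-vagrant/bufferbloat/plot_efic_fairness.py | agrupar_por_tempo
-- ===== SOURCE A (Python) =====
-- from collections import defaultdict
--
-- def agrupar_por_tempo(lista_de_series):
--     """Converte listas [(tempos, vazoes), ...] em dicionário tempo → lista de valores"""
--     conjunto_tempos = set.intersection(*[set(t) for (t, _) in lista_de_series])
--     agrupado = defaultdict(list)
--     for t in sorted(conjunto_tempos):
--         for tempos, valores in lista_de_series:
--             idx = tempos.index(t)
--             agrupado[t].append(valores[idx])
--     return agrupado
-- ===== SOURCE B (Python) =====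
-- from collections import defaultdict, Counter
--
-- def agrupar_por_tempo(lista_de_series):
--     """Converte listas [(tempos, vazoes), ...] em dicionário tempo → lista de valores"""
--     grupos = defaultdict(list)
--     contagem = Counter()
--     for tempos, valores in lista_de_series:
--         primeiro = {}
--         for t, v in zip(tempos, valores):
--             primeiro.setdefault(t, v)
--         for t, v in primeiro.items():
--             grupos[t].append(v)
--             contagem[t] += 1
--     n = len(lista_de_series)
--     resultado = defaultdict(list)
--     for t in sorted(contagem):
--         if contagem[t] == n:
--             resultado[t] = grupos[t]
--     return resultado
-- ===== Notes on version B (the rewrite author's own statement) =====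
-- stated objective: alternative
-- what changed: Instead of intersecting the time sets and then, for every sorted common time, rescanning every series with list.index, B makes one pass over the series building a first-occurrence dict per series that feeds a time-to-values dict and a counter, then emits in sorted order the times counted in every series; on the generated inputs this was not measurably faster.
import Mathlib
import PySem

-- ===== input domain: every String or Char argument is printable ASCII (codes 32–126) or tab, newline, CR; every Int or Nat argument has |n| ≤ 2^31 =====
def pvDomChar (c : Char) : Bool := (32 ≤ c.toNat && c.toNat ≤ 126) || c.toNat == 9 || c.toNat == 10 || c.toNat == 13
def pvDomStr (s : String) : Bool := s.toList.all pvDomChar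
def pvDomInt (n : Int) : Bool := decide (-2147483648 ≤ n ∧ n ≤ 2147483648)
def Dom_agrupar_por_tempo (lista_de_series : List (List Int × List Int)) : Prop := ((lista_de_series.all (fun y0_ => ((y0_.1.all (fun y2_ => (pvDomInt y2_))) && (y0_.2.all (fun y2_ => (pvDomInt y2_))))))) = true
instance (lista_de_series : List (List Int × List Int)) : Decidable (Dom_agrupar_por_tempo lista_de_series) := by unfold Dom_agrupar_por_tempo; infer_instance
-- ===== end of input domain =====

-- B replaces A's intersection-then-repeated-list.index scans by ONE pass over the series (a first-occurrence
-- dict per series feeding a time→values dict and a counter), then emits the sorted times seen in every series;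
-- equivalence is about the RETURN value (neither version mutates its argument).

-- ===== PORT A =====
def agrupar_por_tempo (lista_de_series : List (List Int × List Int)) : List (Int × List Int) :=
  match lista_de_series with
  | [] => []  -- Python: set.intersection(*[]) raises TypeError; excluded by Pre_
  | p0 :: resto =>
    let conjunto_tempos : PySem.Set Int :=
      resto.foldl (fun s q => PySem.Set.inter s (PySem.Set.ofList q.1)) (PySem.Set.ofList p0.1)
    let agrupado : PySem.Dict Int (List Int) :=
      (PySem.List.sorted conjunto_tempos (fun t => t)).foldl
        (fun d t =>
          (p0 :: resto).foldl (fun d pq =>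
            let idx : Nat := (PySem.List.index? pq.1 t).getD 0   -- tempos.index(t); under Pre_ it is `some` and in range
            let v : Int := (PySem.List.pyGet? pq.2 (idx : Int)).getD 0
            d.modify t [] (fun xs => xs ++ [v])) d)
        PySem.Dict.empty
    agrupado.items

-- ===== PORT B =====
def agrupar_por_tempo_alt (lista_de_series : List (List Int × List Int)) : List (Int × List Int) :=
  let gc :=
    lista_de_series.foldl
      (fun st pq =>
        let primeiro : PySem.Dict Int Int :=
          (pq.1.zip pq.2).foldl (fun d tv => d.setdefault tv.1 tv.2) PySem.Dict.empty
        primeiro.items.foldl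
          (fun st tv => (st.1.modify tv.1 [] (fun xs => xs ++ [tv.2]), st.2.modify tv.1 0 (fun c => c + 1)))
          st)
      ((PySem.Dict.empty : PySem.Dict Int (List Int)), (PySem.Dict.empty : PySem.Dict Int Int))
  let n : Int := lista_de_series.length
  let resultado : PySem.Dict Int (List Int) :=
    (PySem.List.sorted gc.2.keys (fun t => t)).foldl
      (fun r t => if gc.2.getD t 0 == n then r.insert t (gc.1.getD t []) else r)
      PySem.Dict.empty
  resultado.items

-- ===== PRECONDITION & SPEC =====
-- Pre_ excludes exactly the inputs where A raises: the empty list (set.intersection with no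
-- arguments is a TypeError) and inputs where some common time's first index in a series' tempos
-- is out of range for that series' valores (IndexError). A returns on every other input.
def Pre_agrupar_por_tempo (lista_de_series : List (List Int × List Int)) : Prop :=
  lista_de_series ≠ [] ∧
  ∀ p ∈ lista_de_series, ∀ t ∈ (lista_de_series.headD ([], [])).1,
    (∀ q ∈ lista_de_series, t ∈ q.1) →
    (PySem.List.index? p.1 t).getD 0 < p.2.length
instance (lista_de_series : List (List Int × List Int)) : Decidable (Pre_agrupar_por_tempo lista_de_series) := by unfold Pre_agrupar_por_tempo; infer_instance
def pvWitness_agrupar_por_tempo : (List (List Int × List Int)) := [([0, 1, 2], [5, 6, 7]), ([2, 1, 0, 1], [8, 9, 10, 11])]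

def Spec_agrupar_por_tempo (lista_de_series : List (List Int × List Int)) (out : List (Int × List Int)) : Prop := out = agrupar_por_tempo_alt lista_de_series
instance (lista_de_series : List (List Int × List Int)) (out : List (Int × List Int)) : Decidable (Spec_agrupar_por_tempo lista_de_series out) := by unfold Spec_agrupar_por_tempo; infer_instance

-- ===== CLAIM (what is proved, stated in full; the proofs are below) =====
def Claim_equal_agrupar_por_tempo : Prop := ∀ (lista_de_series : List (List Int × List Int)), Dom_agrupar_por_tempo lista_de_series → Pre_agrupar_por_tempo lista_de_series → Spec_agrupar_por_tempo lista_de_series (agrupar_por_tempo lista_de_series)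

-- ===== LEMMAS AND PROOFS =====

-- A's per-series value at time t: valores[tempos.index(t)]
def pvVal (pq : List Int × List Int) (t : Int) : Int :=
  (PySem.List.pyGet? pq.2 (((PySem.List.index? pq.1 t).getD 0 : Nat) : Int)).getD 0

-- B's per-series first-occurrence dict
def pvPrim (pq : List Int × List Int) : PySem.Dict Int Int :=
  (pq.1.zip pq.2).foldl (fun d tv => d.setdefault tv.1 tv.2) PySem.Dict.empty

lemma pv_mem_interFold (resto : List (List Int × List Int)) (s : PySem.Set Int) (t : Int) :
    t ∈ resto.foldl (fun s q => PySem.Set.inter s (PySem.Set.ofList q.1)) s ↔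
      t ∈ s ∧ ∀ q ∈ resto, t ∈ q.1 := by
  induction resto generalizing s with
  | nil => simp
  | cons q resto ih =>
    simp only [List.foldl_cons, ih, PySem.Set.mem_inter, PySem.Set.mem_ofList, List.mem_cons]
    constructor
    · rintro ⟨⟨hs, hq⟩, hrest⟩
      exact ⟨hs, by rintro q' (rfl | hq'); exact hq; exact hrest q' hq'⟩
    · rintro ⟨hs, hall⟩
      exact ⟨⟨hs, hall q (Or.inl rfl)⟩, fun q' hq' => hall q' (Or.inr hq')⟩

lemma pv_nodup_interFold (resto : List (List Int × List Int)) (s : PySem.Set Int) (hs : s.Nodup) :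
    (resto.foldl (fun s q => PySem.Set.inter s (PySem.Set.ofList q.1)) s).Nodup := by
  induction resto generalizing s with
  | nil => exact hs
  | cons q resto ih => exact ih _ (PySem.Set.nodup_inter _ _ hs)

lemma pv_sorted_pairwise_lt (xs : List Int) (h : xs.Nodup) :
    (PySem.List.sorted xs (fun t => t)).Pairwise (· < ·) := by
  rw [← PySem.Set.ofList_eq_self_of_nodup xs h]
  exact PySem.List.sorted_ofList_pairwise_lt xs

lemma pv_getD_of_contains_false {κ ν : Type} [BEq κ] (d : PySem.Dict κ ν) (k : κ) (dflt : ν)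
    (h : d.contains k = false) : d.getD k dflt = dflt := by
  have hfind : d.items.find? (fun p => p.1 == k) = none := by
    rw [List.find?_eq_none]
    intro p hp
    simp only [PySem.Dict.contains] at h
    rw [List.any_eq_false] at h
    simpa using h p hp
  simp [PySem.Dict.getD, PySem.Dict.get?, hfind]

-- A's inner loop over the series at a fixed time t is one insert of the appended value list
lemma pv_innerA (pq : List Int × List Int) (rest : List (List Int × List Int)) (t : Int)
    (d : PySem.Dict Int (List Int)) :
    (pq :: rest).foldl (fun d pq =>
        d.modify t [] (fun xs => xs ++ [(PySem.List.pyGet? pq.2 (((PySem.List.index? pq.1 t).getD 0 : Nat) : Int)).getD 0])) d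
      = d.insert t (d.getD t [] ++ (pq :: rest).map (fun pq => pvVal pq t)) := by
  induction rest generalizing pq d with
  | nil => simp [PySem.Dict.modify, pvVal]
  | cons pq' rest ih =>
    rw [List.foldl_cons]
    show ((pq' :: rest).foldl _ (d.modify t [] _)) = _
    rw [ih pq' (d.modify t [] _)]
    simp [PySem.Dict.modify, PySem.Dict.insert_insert_self, PySem.Dict.getD_insert_self, pvVal]

-- a fold inserting fresh distinct keys with a value extending the (empty) current one appends items
lemma pv_items_foldl_insert_getD (l : List Int) (F : Int → List Int) (d : PySem.Dict Int (List Int))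
    (hnd : l.Nodup) (hfresh : ∀ t ∈ l, d.contains t = false) :
    (l.foldl (fun d t => d.insert t (d.getD t [] ++ F t)) d).items
      = d.items ++ l.map (fun t => (t, F t)) := by
  induction l generalizing d with
  | nil => simp
  | cons t l ih =>
    rw [List.foldl_cons]
    have hct : d.contains t = false := hfresh t (List.mem_cons_self)
    have hd : d.getD t [] = [] := pv_getD_of_contains_false d t [] hct
    rw [hd]
    have hnd' : l.Nodup := hnd.of_cons
    have hfresh' : ∀ t' ∈ l, (d.insert t (([] : List Int) ++ F t)).contains t' = false := by
      intro t' ht'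
      rw [PySem.Dict.contains_insert]
      have hne : t' ≠ t := by
        rintro rfl
        exact (List.nodup_cons.mp hnd).1 ht'
      simp [hne, hfresh t' (List.mem_cons_of_mem _ ht')]
    rw [ih _ hnd' hfresh']
    have : (d.insert t (([] : List Int) ++ F t)).items = d.items ++ [(t, F t)] := by
      have := PySem.Dict.items_foldl_insert_fresh [t] (fun x => x) (fun _ => ([] : List Int) ++ F t) d
        (by intro a ha; simp at ha; subst ha; exact hct) (by simp)
      simpa using this
    rw [this]
    simp

-- items of A's agrupado
lemma pv_itemsA (lista : List (List Int × List Int)) (p0 : List Int × List Int)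
    (resto : List (List Int × List Int)) (hl : lista = p0 :: resto)
    (times : List Int) (hnd : times.Nodup) :
    (times.foldl
        (fun d t =>
          (p0 :: resto).foldl (fun d pq =>
            d.modify t [] (fun xs => xs ++ [(PySem.List.pyGet? pq.2 (((PySem.List.index? pq.1 t).getD 0 : Nat) : Int)).getD 0])) d)
        PySem.Dict.empty).items
      = times.map (fun t => (t, lista.map (fun pq => pvVal pq t))) := by
  subst hl
  have hfun : (fun (d : PySem.Dict Int (List Int)) (t : Int) =>
      (p0 :: resto).foldl (fun d pq =>
        d.modify t [] (fun xs => xs ++ [(PySem.List.pyGet? pq.2 (((PySem.List.index? pq.1 t).getD 0 : Nat) : Int)).getD 0])) d)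
      = fun d t => d.insert t (d.getD t [] ++ (p0 :: resto).map (fun pq => pvVal pq t)) := by
    funext d t
    exact pv_innerA p0 resto t d
  rw [hfun]
  have := pv_items_foldl_insert_getD times (fun t => (p0 :: resto).map (fun pq => pvVal pq t))
    PySem.Dict.empty hnd (by intro t _; exact PySem.Dict.contains_empty t)
  simpa using this

-- B: first-occurrence dict lookups
lemma pv_get?_foldl_setdefault (l : List (Int × Int)) (d : PySem.Dict Int Int) (t : Int) :
    (l.foldl (fun d tv => d.setdefault tv.1 tv.2) d).get? t
      = (d.get? t).or ((l.find? (fun tv => tv.1 == t)).map (·.2)) := by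
  induction l generalizing d with
  | nil => simp
  | cons tv l ih =>
    rw [List.foldl_cons, ih]
    by_cases h : tv.1 = t
    · subst h
      rw [PySem.Dict.get?_setdefault_self]
      have hf : ((tv.1, tv.2) :: l).find? (fun x => x.1 == tv.1) = some (tv.1, tv.2) := by
        simp
      cases hd : d.get? tv.1 <;> simp_all
    · rw [PySem.Dict.get?_setdefault_of_ne _ _ (fun he => h he.symm)]
      have : ((tv.1, tv.2) :: l).find? (fun x => x.1 == t) = l.find? (fun x => x.1 == t) := by
        simp [h]
      simp_all

lemma pv_keys_foldl_setdefault (l : List (Int × Int)) (d : PySem.Dict Int Int) :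
    (l.foldl (fun d tv => d.setdefault tv.1 tv.2) d).keys
      = PySem.Set.update d.keys (l.map (·.1)) := by
  induction l generalizing d with
  | nil => simp [PySem.Set.update]
  | cons tv l ih =>
    rw [List.foldl_cons, ih]
    have hkeys : (d.setdefault tv.1 tv.2).keys = PySem.Set.add d.keys tv.1 := by
      rw [PySem.Dict.keys_setdefault]
      by_cases h : d.contains tv.1 = true
      · have hm : tv.1 ∈ d.keys := (PySem.Dict.contains_iff_mem_keys d tv.1).mp h
        simp only [h, if_true, PySem.Set.add, (PySem.Set.contains_iff d.keys tv.1).mpr hm]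
      · have hb : d.contains tv.1 = false := by simpa using h
        have hm : tv.1 ∉ d.keys := fun hm => by
          rw [(PySem.Dict.contains_iff_mem_keys d tv.1).mpr hm] at hb; exact Bool.true_eq_false.mp hb
        have : (PySem.Set.contains d.keys tv.1) = false := by
          by_contra hc
          simp only [Bool.not_eq_false] at hc
          exact hm ((PySem.Set.contains_iff d.keys tv.1).mp hc)
        simp [hb, PySem.Set.add, hm]
    rw [hkeys]
    simp [PySem.Set.update]

lemma pv_keys_prim (pq : List Int × List Int) :
    (pvPrim pq).keys = PySem.Set.ofList ((pq.1.zip pq.2).map (·.1)) := by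
  unfold pvPrim
  rw [pv_keys_foldl_setdefault]
  simp [PySem.Dict.keys_empty, PySem.Set.update, PySem.Set.ofList]

lemma pv_nodup_keys_prim (pq : List Int × List Int) : (pvPrim pq).keys.Nodup := by
  rw [pv_keys_prim]; exact PySem.Set.nodup_ofList _

lemma pv_mem_keys_prim (pq : List Int × List Int) (t : Int) :
    t ∈ (pvPrim pq).keys ↔ t ∈ (pq.1.zip pq.2).map (·.1) := by
  rw [pv_keys_prim]; exact PySem.Set.mem_ofList _ t

-- splitting B's paired fold into the two dict folds
lemma pv_gc_split (lista : List (List Int × List Int)) :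
    lista.foldl
      (fun st pq =>
        ((pvPrim pq).items.foldl
          (fun st tv => (st.1.modify tv.1 [] (fun xs => xs ++ [tv.2]), st.2.modify tv.1 0 (fun c => c + 1)))
          st))
      ((PySem.Dict.empty : PySem.Dict Int (List Int)), (PySem.Dict.empty : PySem.Dict Int Int))
    = (lista.foldl (fun g pq => (pvPrim pq).items.foldl (fun g tv => g.modify tv.1 [] (fun xs => xs ++ [tv.2])) g) PySem.Dict.empty,
       lista.foldl (fun c pq => (pvPrim pq).items.foldl (fun c tv => c.modify tv.1 0 (fun x => x + 1)) c) PySem.Dict.empty) := by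
  have h1 : (fun (st : PySem.Dict Int (List Int) × PySem.Dict Int Int) (pq : List Int × List Int) =>
      ((pvPrim pq).items.foldl
        (fun st tv => (st.1.modify tv.1 [] (fun xs => xs ++ [tv.2]), st.2.modify tv.1 0 (fun c => c + 1)))
        st))
      = fun st pq =>
        ((pvPrim pq).items.foldl (fun g tv => g.modify tv.1 [] (fun xs => xs ++ [tv.2])) st.1,
         (pvPrim pq).items.foldl (fun c tv => c.modify tv.1 0 (fun x => x + 1)) st.2) := by
    funext st pq
    exact PySem.List.foldl_prod_mk
      (fun g (tv : Int × Int) => PySem.Dict.modify g tv.1 [] (fun xs => xs ++ [tv.2]))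
      (fun c (tv : Int × Int) => PySem.Dict.modify c tv.1 0 (fun x => x + 1))
      (pvPrim pq).items st.1 st.2
  rw [h1]
  exact PySem.List.foldl_prod_mk
    (fun (g : PySem.Dict Int (List Int)) pq => (pvPrim pq).items.foldl (fun g tv => PySem.Dict.modify g tv.1 [] (fun xs => xs ++ [tv.2])) g)
    (fun (c : PySem.Dict Int Int) pq => (pvPrim pq).items.foldl (fun c tv => PySem.Dict.modify c tv.1 0 (fun x => x + 1)) c)
    lista PySem.Dict.empty PySem.Dict.empty

-- the counter: value at t counts the series whose first-occurrence dict holds t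
lemma pv_contagem_getD (lista : List (List Int × List Int)) (c : PySem.Dict Int Int) (t : Int) :
    (lista.foldl (fun c pq => (pvPrim pq).items.foldl (fun c tv => c.modify tv.1 0 (fun x => x + 1)) c) c).getD t 0
      = c.getD t 0 + ((lista.countP (fun pq => (pvPrim pq).contains t) : Int)) := by
  induction lista generalizing c with
  | nil => simp
  | cons pq lista ih =>
    rw [List.foldl_cons, ih]
    have hstep : ((pvPrim pq).items.foldl (fun c tv => c.modify tv.1 0 (fun x => x + 1)) c).getD t 0
        = c.getD t 0 + ((pvPrim pq).keys.count t : Int) := by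
      have hm : (pvPrim pq).items.foldl (fun c tv => c.modify tv.1 0 (fun x => x + 1)) c
          = ((pvPrim pq).items.map (·.1)).foldl (fun c x => c.modify x 0 (fun y => y + 1)) c := by
        rw [List.foldl_map]
      rw [hm]
      have := PySem.Dict.getD_foldl_modify_add_one ((pvPrim pq).items.map (·.1)) c t
      simpa [PySem.Dict.keys] using this
    rw [hstep]
    have hcount : ((pvPrim pq).keys.count t : Int) = if (pvPrim pq).contains t = true then 1 else 0 := by
      by_cases h : t ∈ (pvPrim pq).keys
      · rw [List.count_eq_one_of_mem (pv_nodup_keys_prim pq) h]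
        simp [(PySem.Dict.contains_iff_mem_keys _ t).mpr h]
      · rw [List.count_eq_zero_of_not_mem h]
        have : (pvPrim pq).contains t = false := by
          by_contra hc
          simp only [Bool.not_eq_false] at hc
          exact h ((PySem.Dict.contains_iff_mem_keys _ t).mp hc)
        simp [this]
    rw [hcount]
    simp [List.countP_cons]
    by_cases h : (pvPrim pq).contains t = true
    · simp [h]
      ring
    · simp [h]

lemma pv_contagem_keys_mem (lista : List (List Int × List Int)) (c : PySem.Dict Int Int) (t : Int) :
    t ∈ (lista.foldl (fun c pq => (pvPrim pq).items.foldl (fun c tv => c.modify tv.1 0 (fun x => x + 1)) c) c).keys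
      ↔ t ∈ c.keys ∨ ∃ pq ∈ lista, t ∈ (pvPrim pq).keys := by
  induction lista generalizing c with
  | nil => simp
  | cons pq lista ih =>
    rw [List.foldl_cons, ih]
    have hk : ((pvPrim pq).items.foldl (fun c tv => c.modify tv.1 0 (fun x => x + 1)) c).keys
        = PySem.Set.update c.keys ((pvPrim pq).items.map (·.1)) := by
      have hm : (pvPrim pq).items.foldl (fun c tv => c.modify tv.1 0 (fun x => x + 1)) c
          = ((pvPrim pq).items.map (·.1)).foldl (fun c x => c.modify x 0 (fun y => y + 1)) c := by
        rw [List.foldl_map]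
      rw [hm]
      exact PySem.Dict.keys_foldl_modify _ _ _ c
    rw [hk]
    rw [PySem.Set.mem_update]
    constructor
    · rintro (⟨h | h⟩ | ⟨pq', hpq', ht'⟩)
      · exact Or.inl h
      · exact Or.inr ⟨pq, List.mem_cons_self, by simpa [PySem.Dict.keys] using h⟩
      · exact Or.inr ⟨pq', List.mem_cons_of_mem _ hpq', ht'⟩
    · rintro (h | ⟨pq', hpq', ht'⟩)
      · exact Or.inl (Or.inl h)
      · rcases List.mem_cons.mp hpq' with rfl | hmem
        · exact Or.inl (Or.inr (by simpa [PySem.Dict.keys] using ht'))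
        · exact Or.inr ⟨pq', hmem, ht'⟩

lemma pv_contagem_keys_nodup (lista : List (List Int × List Int)) (c : PySem.Dict Int Int)
    (hc : c.keys.Nodup) :
    (lista.foldl (fun c pq => (pvPrim pq).items.foldl (fun c tv => c.modify tv.1 0 (fun x => x + 1)) c) c).keys.Nodup := by
  induction lista generalizing c with
  | nil => exact hc
  | cons pq lista ih =>
    rw [List.foldl_cons]
    apply ih
    have hm : (pvPrim pq).items.foldl (fun c tv => c.modify tv.1 0 (fun x => x + 1)) c
        = ((pvPrim pq).items.map (·.1)).foldl (fun c x => c.modify x 0 (fun y => y + 1)) c := by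
      rw [List.foldl_map]
    rw [hm]
    exact PySem.Dict.nodup_keys_foldl_modify_key _ _ _ _ c hc

-- grupos: value list at t concatenates, over the series, the (≤1) first-occurrence values at t
lemma pv_grupos_getD (lista : List (List Int × List Int)) (g : PySem.Dict Int (List Int)) (t : Int) :
    (lista.foldl (fun g pq => (pvPrim pq).items.foldl (fun g tv => g.modify tv.1 [] (fun xs => xs ++ [tv.2])) g) g).getD t []
      = g.getD t [] ++ lista.flatMap (fun pq => (((pvPrim pq).items.filter (fun tv => tv.1 == t)).map (·.2))) := by
  induction lista generalizing g with
  | nil => simp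
  | cons pq lista ih =>
    rw [List.foldl_cons, ih]
    rw [PySem.Dict.getD_foldl_modify_append]
    simp

-- an association list with distinct keys filters at a key to its find?
lemma pv_filter_eq_find? (l : List (Int × Int)) (t : Int) (h : (l.map (·.1)).Nodup) :
    l.filter (fun tv => tv.1 == t) = (l.find? (fun tv => tv.1 == t)).toList := by
  induction l with
  | nil => simp
  | cons tv l ih =>
    have hcons : (tv.1 :: l.map (·.1)).Nodup := by simpa using h
    by_cases he : tv.1 = t
    · subst he
      have hmem : tv.1 ∉ l.map (·.1) := (List.nodup_cons.mp hcons).1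
      have hnil : l.filter (fun x => x.1 == tv.1) = [] := by
        rw [List.filter_eq_nil_iff]
        intro x hx hb
        have hx1 : x.1 = tv.1 := by simpa using hb
        exact hmem (hx1 ▸ List.mem_map_of_mem hx)
      simp [hnil]
    · have h' : (l.map (·.1)).Nodup := (List.nodup_cons.mp hcons).2
      simp [he, ih h']

-- the first value paired with t in a zip is valores[tempos.index(t)]
lemma pv_find_zip (ts vs : List Int) (t : Int) (i : Nat)
    (hi : List.idxOf? t ts = some i) (hlen : i < vs.length) :
    (ts.zip vs).find? (fun tv => tv.1 == t) = some (t, vs[i]) := by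
  induction ts generalizing vs i with
  | nil => simp at hi
  | cons a ts ih =>
    cases vs with
    | nil => simp at hlen
    | cons b vs =>
      rw [List.idxOf?_eq_some_iff] at hi
      obtain ⟨hlt, hget, hmin⟩ := hi
      by_cases hat : a = t
      · subst hat
        have hi0 : i = 0 := by
          by_contra hne
          exact hmin 0 (Nat.pos_of_ne_zero hne) (by simp)
        subst hi0
        simp
      · obtain ⟨j, rfl⟩ : ∃ j, i = j + 1 := by
          cases i with
          | zero => exact absurd (by simpa using hget) (fun he => hat he)
          | succ j => exact ⟨j, rfl⟩
        have hi' : List.idxOf? t ts = some j := by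
          rw [List.idxOf?_eq_some_iff]
          refine ⟨by simpa using hlt, by simpa using hget, ?_⟩
          intro k hk
          have := hmin (k + 1) (by omega)
          simpa using this
        have hlen' : j < vs.length := by simpa using hlen
        have hih := ih vs j hi' hlen'
        rw [List.zip_cons_cons, List.find?_cons_of_neg (by simpa using hat), hih]
        simp

-- under Pre_, at a common time each series' first-occurrence dict holds exactly A's value
lemma pv_prim_at_common (pq : List Int × List Int) (t : Int) (i : Nat)
    (hi : List.idxOf? t pq.1 = some i) (hlen : i < pq.2.length) :
    ((pvPrim pq).items.filter (fun tv => tv.1 == t)).map (·.2) = [pvVal pq t] := by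
  have hfind := pv_find_zip pq.1 pq.2 t i hi hlen
  have hget : (pvPrim pq).get? t = some (pq.2[i]) := by
    unfold pvPrim
    rw [pv_get?_foldl_setdefault]
    simp [hfind]
  have hfilter := pv_filter_eq_find? (pvPrim pq).items t
    (by have := pv_nodup_keys_prim pq; simpa [PySem.Dict.keys] using this)
  rw [hfilter]
  have : (pvPrim pq).items.find? (fun tv => tv.1 == t) = some (t, pq.2[i]) := by
    have hgd : ((pvPrim pq).items.find? (fun tv => tv.1 == t)).map (·.2) = some (pq.2[i]) := by
      simpa [PySem.Dict.get?] using hget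
    rcases hf : (pvPrim pq).items.find? (fun tv => tv.1 == t) with _ | ⟨a, b⟩
    · rw [hf] at hgd; simp at hgd
    · rw [hf] at hgd
      simp only [Option.map_some, Option.some.injEq] at hgd
      have ha : a = t := by
        have := List.find?_some hf
        simpa using this
      rw [hf, ha, hgd]
  rw [this]
  have hval : pvVal pq t = pq.2[i] := by
    unfold pvVal
    rw [show PySem.List.index? pq.1 t = some i from hi]
    simp [hlen]
  simp [hval]

-- B's two dicts, as standalone folds
def pvGrupos (lista : List (List Int × List Int)) : PySem.Dict Int (List Int) :=
  lista.foldl (fun g pq => (pvPrim pq).items.foldl (fun g tv => g.modify tv.1 [] (fun xs => xs ++ [tv.2])) g) PySem.Dict.empty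

def pvContagem (lista : List (List Int × List Int)) : PySem.Dict Int Int :=
  lista.foldl (fun c pq => (pvPrim pq).items.foldl (fun c tv => c.modify tv.1 0 (fun x => x + 1)) c) PySem.Dict.empty

lemma pv_A_canon (p0 : List Int × List Int) (resto : List (List Int × List Int)) :
    agrupar_por_tempo (p0 :: resto) =
      (PySem.List.sorted (resto.foldl (fun s q => PySem.Set.inter s (PySem.Set.ofList q.1)) (PySem.Set.ofList p0.1)) (fun t => t)).map
        (fun t => (t, (p0 :: resto).map (fun pq => pvVal pq t))) := by
  have hnd : (PySem.List.sorted (resto.foldl (fun s q => PySem.Set.inter s (PySem.Set.ofList q.1)) (PySem.Set.ofList p0.1)) (fun t => t)).Nodup := by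
    exact (pv_sorted_pairwise_lt _ (pv_nodup_interFold resto _ (PySem.Set.nodup_ofList p0.1))).imp ne_of_lt
  exact pv_itemsA (p0 :: resto) p0 resto rfl _ hnd

lemma pv_B_canon (lista : List (List Int × List Int)) :
    agrupar_por_tempo_alt lista =
      ((PySem.List.sorted (pvContagem lista).keys (fun t => t)).filter
          (fun t => (pvContagem lista).getD t 0 == (lista.length : Int))).map
        (fun t => (t, (pvGrupos lista).getD t [])) := by
  have hsplit := pv_gc_split lista
  show ((PySem.List.sorted (lista.foldl
      (fun st pq =>
        ((pvPrim pq).items.foldl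
          (fun st tv => (st.1.modify tv.1 [] (fun xs => xs ++ [tv.2]), st.2.modify tv.1 0 (fun c => c + 1)))
          st))
      ((PySem.Dict.empty : PySem.Dict Int (List Int)), (PySem.Dict.empty : PySem.Dict Int Int))).2.keys (fun t => t)).foldl
      (fun r t => if (lista.foldl
      (fun st pq =>
        ((pvPrim pq).items.foldl
          (fun st tv => (st.1.modify tv.1 [] (fun xs => xs ++ [tv.2]), st.2.modify tv.1 0 (fun c => c + 1)))
          st))
      ((PySem.Dict.empty : PySem.Dict Int (List Int)), (PySem.Dict.empty : PySem.Dict Int Int))).2.getD t 0 == (lista.length : Int)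
        then r.insert t ((lista.foldl
      (fun st pq =>
        ((pvPrim pq).items.foldl
          (fun st tv => (st.1.modify tv.1 [] (fun xs => xs ++ [tv.2]), st.2.modify tv.1 0 (fun c => c + 1)))
          st))
      ((PySem.Dict.empty : PySem.Dict Int (List Int)), (PySem.Dict.empty : PySem.Dict Int Int))).1.getD t []) else r)
      PySem.Dict.empty).items = _
  rw [hsplit]
  show ((PySem.List.sorted (pvContagem lista).keys (fun t => t)).foldl
      (fun r t => if (pvContagem lista).getD t 0 == (lista.length : Int)
        then r.insert t ((pvGrupos lista).getD t []) else r)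
      PySem.Dict.empty).items = _
  rw [← List.foldl_filter]
  have hpair : ((PySem.List.sorted (pvContagem lista).keys (fun t => t)).filter
      (fun t => (pvContagem lista).getD t 0 == (lista.length : Int))).Pairwise (· < ·) := by
    apply List.Pairwise.filter
    apply pv_sorted_pairwise_lt
    apply pv_contagem_keys_nodup
    simp [PySem.Dict.keys_empty]
  have := PySem.Dict.items_foldl_insert_fresh
    ((PySem.List.sorted (pvContagem lista).keys (fun t => t)).filter
      (fun t => (pvContagem lista).getD t 0 == (lista.length : Int)))
    (fun t => t) (fun t => (pvGrupos lista).getD t []) PySem.Dict.empty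
    (by intro a _; exact PySem.Dict.contains_empty a)
    (by simpa using hpair.imp ne_of_lt)
  simpa using this

-- membership in B's emitted time list = membership in every series' tempos (under Pre_)
lemma pv_memKf (p0 : List Int × List Int) (resto : List (List Int × List Int))
    (hidx : ∀ p ∈ (p0 :: resto), ∀ t ∈ p0.1,
      (∀ q ∈ (p0 :: resto), t ∈ q.1) → (PySem.List.index? p.1 t).getD 0 < p.2.length)
    (t : Int) :
    t ∈ ((PySem.List.sorted (pvContagem (p0 :: resto)).keys (fun t => t)).filter
          (fun t => (pvContagem (p0 :: resto)).getD t 0 == ((p0 :: resto).length : Int)))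
      ↔ ∀ q ∈ (p0 :: resto), t ∈ q.1 := by
  have hcont : ∀ pq ∈ (p0 :: resto), ((pvPrim pq).contains t = true ↔ t ∈ (pq.1.zip pq.2).map (·.1)) := by
    intro pq _
    rw [PySem.Dict.contains_iff_mem_keys, pv_mem_keys_prim]
  have hgetD : (pvContagem (p0 :: resto)).getD t 0
      = (((p0 :: resto).countP (fun pq => (pvPrim pq).contains t) : Int)) := by
    unfold pvContagem
    rw [pv_contagem_getD]
    simp
  constructor
  · intro hmem
    rw [List.mem_filter] at hmem
    obtain ⟨-, hcnt⟩ := hmem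
    rw [hgetD] at hcnt
    have hcnt' : (p0 :: resto).countP (fun pq => (pvPrim pq).contains t) = (p0 :: resto).length := by
      have := beq_iff_eq.mp hcnt
      exact_mod_cast this
    have hall := List.countP_eq_length.mp hcnt'
    intro q hq
    have hc := (hcont q hq).mp (hall q hq)
    obtain ⟨tv, htv, htv1⟩ := List.mem_map.mp hc
    have htv' : (tv.1, tv.2) ∈ q.1.zip q.2 := by simpa using htv
    exact htv1 ▸ (List.of_mem_zip htv').1
  · intro hcommon
    have hall : ∀ pq ∈ (p0 :: resto), (pvPrim pq).contains t = true := by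
      intro pq hpq
      rw [hcont pq hpq]
      have htmem : t ∈ pq.1 := hcommon pq hpq
      obtain ⟨i, hi⟩ : ∃ i, List.idxOf? t pq.1 = some i := by
        rcases h : List.idxOf? t pq.1 with _ | i
        · exact absurd (List.idxOf?_eq_none_iff.mp h) (by simpa using htmem)
        · exact ⟨i, rfl⟩
      have hlen : i < pq.2.length := by
        have := hidx pq hpq t (hcommon p0 List.mem_cons_self) hcommon
        simpa [PySem.List.index?, hi] using this
      have hfind := pv_find_zip pq.1 pq.2 t i hi hlen
      have := List.mem_of_find?_eq_some hfind
      exact List.mem_map.mpr ⟨(t, pq.2[i]), this, rfl⟩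
    have hcnt : (pvContagem (p0 :: resto)).getD t 0 = ((p0 :: resto).length : Int) := by
      rw [hgetD]
      exact_mod_cast congrArg Nat.cast (List.countP_eq_length.mpr hall)
    rw [List.mem_filter]
    refine ⟨?_, by simp [hcnt]⟩
    have hkeys : t ∈ (pvContagem (p0 :: resto)).keys := by
      unfold pvContagem
      rw [pv_contagem_keys_mem]
      right
      refine ⟨p0, List.mem_cons_self, ?_⟩
      have := hall p0 List.mem_cons_self
      exact (PySem.Dict.contains_iff_mem_keys _ t).mp this
    exact ((PySem.List.sorted_perm (pvContagem (p0 :: resto)).keys (fun t => t) false).mem_iff).mpr hkeys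

-- at a common time (under Pre_) B's value list is A's
lemma pv_grupos_common (p0 : List Int × List Int) (resto : List (List Int × List Int))
    (hidx : ∀ p ∈ (p0 :: resto), ∀ t ∈ p0.1,
      (∀ q ∈ (p0 :: resto), t ∈ q.1) → (PySem.List.index? p.1 t).getD 0 < p.2.length)
    (t : Int) (hcommon : ∀ q ∈ (p0 :: resto), t ∈ q.1) :
    (pvGrupos (p0 :: resto)).getD t [] = (p0 :: resto).map (fun pq => pvVal pq t) := by
  unfold pvGrupos
  rw [pv_grupos_getD]
  simp only [PySem.Dict.getD, PySem.Dict.get?_empty, Option.getD_none, List.nil_append]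
  have hsing : ∀ pq ∈ (p0 :: resto),
      ((pvPrim pq).items.filter (fun tv => tv.1 == t)).map (·.2) = [pvVal pq t] := by
    intro pq hpq
    have htmem : t ∈ pq.1 := hcommon pq hpq
    obtain ⟨i, hi⟩ : ∃ i, List.idxOf? t pq.1 = some i := by
      rcases h : List.idxOf? t pq.1 with _ | i
      · exact absurd (List.idxOf?_eq_none_iff.mp h) (by simpa using htmem)
      · exact ⟨i, rfl⟩
    have hlen : i < pq.2.length := by
      have := hidx pq hpq t (hcommon p0 List.mem_cons_self) hcommon
      simpa [PySem.List.index?, hi] using this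
    exact pv_prim_at_common pq t i hi hlen
  calc (p0 :: resto).flatMap (fun pq => ((pvPrim pq).items.filter (fun tv => tv.1 == t)).map (·.2))
      = (p0 :: resto).flatMap (fun pq => [pvVal pq t]) := by
        rw [List.flatMap_def, List.flatMap_def, List.map_congr_left hsing]
    _ = (p0 :: resto).map (fun pq => pvVal pq t) := (List.map_eq_flatMap).symm

-- final assembly
theorem pv_main (lista : List (List Int × List Int)) (hpre : Pre_agrupar_por_tempo lista) :
    agrupar_por_tempo lista = agrupar_por_tempo_alt lista := by
  obtain ⟨hne, hidx⟩ := hpre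
  obtain ⟨p0, resto, rfl⟩ : ∃ p0 resto, lista = p0 :: resto := by
    cases lista with
    | nil => exact absurd rfl hne
    | cons p0 resto => exact ⟨p0, resto, rfl⟩
  simp only [List.headD_cons] at hidx
  rw [pv_A_canon, pv_B_canon]
  have hKf := pv_memKf p0 resto hidx
  have hC : ∀ t : Int,
      t ∈ PySem.List.sorted (resto.foldl (fun s q => PySem.Set.inter s (PySem.Set.ofList q.1)) (PySem.Set.ofList p0.1)) (fun t => t)
        ↔ ∀ q ∈ (p0 :: resto), t ∈ q.1 := by
    intro t
    rw [(PySem.List.sorted_perm _ (fun t => t) false).mem_iff]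
    rw [pv_mem_interFold, PySem.Set.mem_ofList]
    constructor
    · rintro ⟨h0, hr⟩ q hq
      rcases List.mem_cons.mp hq with rfl | hq'
      · exact h0
      · exact hr q hq'
    · intro h
      exact ⟨h p0 List.mem_cons_self, fun q hq => h q (List.mem_cons_of_mem _ hq)⟩
  have hlists :
      PySem.List.sorted (resto.foldl (fun s q => PySem.Set.inter s (PySem.Set.ofList q.1)) (PySem.Set.ofList p0.1)) (fun t => t)
        = ((PySem.List.sorted (pvContagem (p0 :: resto)).keys (fun t => t)).filter
            (fun t => (pvContagem (p0 :: resto)).getD t 0 == (((p0 :: resto).length : Nat) : Int))) := by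
    have h1 : (PySem.List.sorted (resto.foldl (fun s q => PySem.Set.inter s (PySem.Set.ofList q.1)) (PySem.Set.ofList p0.1)) (fun t => t)).Pairwise (· < ·) :=
      pv_sorted_pairwise_lt _ (pv_nodup_interFold resto _ (PySem.Set.nodup_ofList p0.1))
    have h2 : ((PySem.List.sorted (pvContagem (p0 :: resto)).keys (fun t => t)).filter
        (fun t => (pvContagem (p0 :: resto)).getD t 0 == (((p0 :: resto).length : Nat) : Int))).Pairwise (· < ·) := by
      apply List.Pairwise.filter
      apply pv_sorted_pairwise_lt
      apply pv_contagem_keys_nodup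
      simp [PySem.Dict.keys_empty]
    have hmem : ∀ a : Int, a ∈ _ ↔ a ∈ _ := fun a => (hC a).trans (hKf a).symm
    have hperm := (List.perm_ext_iff_of_nodup (h1.imp ne_of_lt) (h2.imp ne_of_lt)).mpr hmem
    exact List.Perm.eq_of_pairwise (fun a b _ _ hab hba => absurd hba (lt_asymm hab)) h1 h2 hperm
  rw [hlists]
  apply List.map_congr_left
  intro t ht
  have hcommon : ∀ q ∈ (p0 :: resto), t ∈ q.1 := (hKf t).mp ht
  rw [pv_grupos_common p0 resto hidx t hcommon]

-- ===== VERDICT (by name: the statement is the Claim_ definition above) =====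
theorem agrupar_por_tempo_spec : Claim_equal_agrupar_por_tempo := by
  intro lista _ hpre
  unfold Spec_agrupar_por_tempo
  exact pv_main lista hpre
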